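-- pv_equiv track=rewrite | github.com/Silverrhd/AurumFinanceAI | aurum_backend/portfolio/preprocessing/combiners/stdsz_enricher.py | _find_similar_column
-- ===== SOURCE A (Python) =====
-- from typing import Dict, List, Optional, Tuple
--
-- def _find_similar_column(target_col: str, available_cols: List[str]) -> Optional[str]:
--     """Find a similar column name when exact match fails"""
--     target_upper = target_col.upper()
--
--     # Look for columns that start with the target name
--     for col in available_cols:
--         if col.upper().startswith(target_upper):
--             return col
--
--     # Look for columns that contain the target name
--     for col in available_cols:
--         if target_upper in col.upper():
--             return col
--
--     return None
-- ===== SOURCE B (Python) =====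
-- from typing import List, Optional
--
-- def _find_similar_column(target_col: str, available_cols: List[str]) -> Optional[str]:
--     """Find a similar column name when exact match fails (single pass)."""
--     target_upper = target_col.upper()
--     fallback = None
--     for col in available_cols:
--         col_upper = col.upper()
--         if col_upper.startswith(target_upper):
--             return col
--         if fallback is None and target_upper in col_upper:
--             fallback = col
--     return fallback
-- ===== Notes on version B (the rewrite author's own statement) =====
-- stated objective: simpler
-- what changed: Replaces A's two sequential scans over available_cols with a single pass that returns prefix matches immediately and defers the first substring match in an accumulator.
import Mathlib
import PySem

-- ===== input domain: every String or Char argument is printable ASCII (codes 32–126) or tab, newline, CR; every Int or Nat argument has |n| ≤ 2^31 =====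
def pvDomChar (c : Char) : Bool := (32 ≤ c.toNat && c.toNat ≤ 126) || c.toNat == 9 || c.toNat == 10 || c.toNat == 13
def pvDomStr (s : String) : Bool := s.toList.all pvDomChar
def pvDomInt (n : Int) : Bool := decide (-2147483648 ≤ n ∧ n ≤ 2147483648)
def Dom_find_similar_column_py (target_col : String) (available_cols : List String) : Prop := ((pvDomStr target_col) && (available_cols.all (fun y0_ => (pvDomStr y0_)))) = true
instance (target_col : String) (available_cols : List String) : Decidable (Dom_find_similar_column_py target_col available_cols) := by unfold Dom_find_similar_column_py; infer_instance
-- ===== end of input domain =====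

-- ===== PORT A =====
-- File header: B merges A's two scans into one pass with a deferred fallback accumulator (objective: simpler).
def find_similar_column_py (target_col : String) (available_cols : List String) : Option String :=
  let target_upper := PySem.Str.upper target_col
  match available_cols.find? (fun col => PySem.Str.startswith (PySem.Str.upper col) target_upper) with
  | some col => some col
  | none => available_cols.find? (fun col => PySem.Str.isIn target_upper (PySem.Str.upper col))

-- ===== PORT B =====
def fscAltGo (target_upper : String) : List String → Option String → Option String
  | [], fallback => fallback
  | col :: rest, fallback =>
    let col_upper := PySem.Str.upper col
    if PySem.Str.startswith col_upper target_upper then some col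
    else fscAltGo target_upper rest
      (if fallback.isNone && PySem.Str.isIn target_upper col_upper then some col else fallback)

def find_similar_column_py_alt (target_col : String) (available_cols : List String) : Option String :=
  fscAltGo (PySem.Str.upper target_col) available_cols none

-- ===== PRECONDITION & SPEC =====
def Spec_find_similar_column_py (target_col : String) (available_cols : List String) (out : Option String) : Prop := out = find_similar_column_py_alt target_col available_cols
instance (target_col : String) (available_cols : List String) (out : Option String) : Decidable (Spec_find_similar_column_py target_col available_cols out) := by unfold Spec_find_similar_column_py; infer_instance

-- ===== CLAIM (what is proved, stated in full; the proofs are below) =====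
def Claim_equal_find_similar_column_py : Prop := ∀ (target_col : String) (available_cols : List String), Dom_find_similar_column_py target_col available_cols → Spec_find_similar_column_py target_col available_cols (find_similar_column_py target_col available_cols)

-- ===== LEMMAS AND PROOFS =====
theorem fscAltGo_eq (tu : String) (cols : List String) (acc : Option String) :
    fscAltGo tu cols acc =
      match cols.find? (fun col => PySem.Str.startswith (PySem.Str.upper col) tu) with
      | some col => some col
      | none => acc.or (cols.find? (fun col => PySem.Str.isIn tu (PySem.Str.upper col))) := by
  induction cols generalizing acc with
  | nil => cases acc <;> simp [fscAltGo]
  | cons c rest ih =>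
    simp only [fscAltGo, List.find?]
    by_cases hp : PySem.Str.startswith (PySem.Str.upper c) tu = true
    · simp only [hp, if_true, if_pos]
    · simp only [hp, if_false, Bool.false_eq_true, ih]
      cases acc with
      | some a => simp
      | none =>
        by_cases hs : PySem.Chars.isIn tu.toList (PySem.Chars.upper c.toList) = true <;>
          cases hf : rest.find? (fun col => PySem.Str.startswith (PySem.Str.upper col) tu) <;>
            simp [hs, hf]

-- ===== VERDICT (by name: the statement is the Claim_ definition above) =====
theorem find_similar_column_py_spec : Claim_equal_find_similar_column_py := by
  intro target_col available_cols _
  unfold Spec_find_similar_column_py find_similar_column_py find_similar_column_py_alt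
  rw [fscAltGo_eq]
  cases hf : available_cols.find? (fun col => PySem.Str.startswith (PySem.Str.upper col) (PySem.Str.upper target_col)) <;>
    simp only [hf, Option.none_or]
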